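-- pv_equiv track=rewrite | github.com/MrBrantCode/unitest_baseline | mut_generate/mist_train_cf/cf_53812/solution.py | min_decreasing_length
-- ===== SOURCE A (Python) =====
-- def min_decreasing_length(arr):
--     n = len(arr)
--     min_length = n+1
--     current_length = 1
--
--     for i in range(1, n):
--         if arr[i] < arr[i-1]:
--             current_length += 1
--         else:
--             if current_length < min_length:
--                 min_length = current_length
--             current_length = 1
--
--     if current_length < min_length:
--         min_length = current_length
--
--     return min_length if min_length <= n else -1
-- ===== SOURCE B (Python) =====
-- def min_decreasing_length(arr):
--     # Divide and conquer: compute the list of maximal strictly-decreasing run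
--     # lengths by splitting in half and merging the two segmentations (the last
--     # run of the left half fuses with the first run of the right half when the
--     # sequence keeps decreasing across the split), then take the minimum.
--     def runs(xs):
--         if len(xs) == 1:
--             return [1]
--         mid = len(xs) // 2
--         left = runs(xs[:mid])
--         right = runs(xs[mid:])
--         if xs[mid] < xs[mid - 1]:
--             return left[:-1] + [left[-1] + right[0]] + right[1:]
--         return left + right
--
--     if not arr:
--         return -1
--     return min(runs(arr))
-- ===== Notes on version B (the rewrite author's own statement) =====
-- stated objective: alternative
-- what changed: B replaces A's single-pass running-minimum/counter state machine by a divide-and-conquer segmentation: it recursively computes the list of maximal strictly-decreasing run lengths of each half and merges them (fusing the boundary runs when the sequence keeps decreasing across the split), then returns the minimum of that list.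
import Mathlib
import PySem

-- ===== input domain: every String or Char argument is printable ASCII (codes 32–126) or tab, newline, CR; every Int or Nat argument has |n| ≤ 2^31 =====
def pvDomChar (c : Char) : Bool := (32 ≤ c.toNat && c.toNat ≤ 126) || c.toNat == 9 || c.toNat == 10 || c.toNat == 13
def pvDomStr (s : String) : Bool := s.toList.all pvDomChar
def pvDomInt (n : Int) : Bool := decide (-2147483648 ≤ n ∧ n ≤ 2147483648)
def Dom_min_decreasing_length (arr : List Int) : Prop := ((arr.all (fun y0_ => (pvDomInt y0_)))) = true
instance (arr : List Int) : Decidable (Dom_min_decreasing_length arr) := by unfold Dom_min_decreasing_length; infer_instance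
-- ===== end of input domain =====

-- B replaces A's single-pass running-minimum/counter state machine by divide and conquer:
-- it merges the run segmentations of the two halves and takes the minimum run length
-- (objective: alternative; not claimed faster).

-- ===== PORT A =====
def min_decreasing_length (arr : List Int) : Int :=
  let n : Int := arr.length
  let s := (PySem.List.pyRange 1 n 1).foldl
    (fun (st : Int × Int) i =>
      if PySem.List.pyGetD arr i 0 < PySem.List.pyGetD arr (i - 1) 0 then
        (st.1, st.2 + 1)
      else
        ((if st.2 < st.1 then st.2 else st.1), 1))
    (n + 1, 1)
  let min_length := if s.2 < s.1 then s.2 else s.1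
  if min_length ≤ n then min_length else -1

-- ===== PORT B =====
-- helper 'runs' of Source B: run-length segmentation by divide and conquer.
-- 'xs[:mid]'/'xs[mid:]' are List.take/List.drop (mid ≥ 0); 'left[:-1]' is dropLast,
-- 'right[1:]' is tail (exact for every list); 'left[-1]'/'right[0]' via pyGetD.
-- The 'xs = []' branch is a totality guard only: Source B never calls runs on [].
def pvRuns (xs : List Int) : List Int :=
  if xs.length = 1 then [1]
  else if h0 : xs = [] then []
  else
    -- 'mid', 'left', 'right' of Source B inlined (mid = len(xs)//2, left/right the recursive calls)
    if PySem.List.pyGetD xs ((xs.length / 2 : Nat) : Int) 0 <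
        PySem.List.pyGetD xs (((xs.length / 2 : Nat) : Int) - 1) 0 then
      (pvRuns (xs.take (xs.length / 2))).dropLast ++
        [PySem.List.pyGetD (pvRuns (xs.take (xs.length / 2))) (-1) 0 +
          PySem.List.pyGetD (pvRuns (xs.drop (xs.length / 2))) 0 0] ++
        (pvRuns (xs.drop (xs.length / 2))).tail
    else pvRuns (xs.take (xs.length / 2)) ++ pvRuns (xs.drop (xs.length / 2))
termination_by xs.length
decreasing_by
  all_goals
    have hx : xs.length ≠ 0 := by simpa [List.length_eq_zero_iff] using h0
    simp only [List.length_take, List.length_drop]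
    omega

def min_decreasing_length_alt (arr : List Int) : Int :=
  if arr = [] then -1
  else
    match PySem.List.min? (pvRuns arr) (fun x => x) with
    | some m => m
    | none => -1   -- unreachable: pvRuns of a nonempty list is nonempty

-- ===== PRECONDITION & SPEC =====
def Spec_min_decreasing_length (arr : List Int) (out : Int) : Prop := out = min_decreasing_length_alt arr
instance (arr : List Int) (out : Int) : Decidable (Spec_min_decreasing_length arr out) := by unfold Spec_min_decreasing_length; infer_instance

-- ===== CLAIM (what is proved, stated in full; the proofs are below) =====
def Claim_equal_min_decreasing_length : Prop := ∀ (arr : List Int), Dom_min_decreasing_length arr → Spec_min_decreasing_length arr (min_decreasing_length arr)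

-- ===== LEMMAS AND PROOFS =====

-- Sequential specification of Source B's 'runs': maximal strictly-decreasing run lengths.
def runsSpec : List Int → List Int
  | [] => []
  | [_] => [1]
  | x :: y :: t =>
    if y < x then
      match runsSpec (y :: t) with
      | [] => []
      | r :: rs => (r + 1) :: rs
    else 1 :: runsSpec (y :: t)

theorem runsSpec_ne_nil (xs : List Int) (h : xs ≠ []) : runsSpec xs ≠ [] := by
  match xs with
  | [_] => simp [runsSpec]
  | x :: y :: t =>
    have ih := runsSpec_ne_nil (y :: t) (by simp)
    simp only [runsSpec]
    split_ifs
    · cases hr : runsSpec (y :: t) with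
      | nil => exact absurd hr ih
      | cons r rs => simp
    · simp

theorem runsSpec_pos (xs : List Int) : ∀ r ∈ runsSpec xs, 1 ≤ r := by
  match xs with
  | [] => simp [runsSpec]
  | [_] => simp [runsSpec]
  | x :: y :: t =>
    have ih := runsSpec_pos (y :: t)
    simp only [runsSpec]
    split_ifs
    · cases hr : runsSpec (y :: t) with
      | nil => simp
      | cons r rs =>
        rw [hr] at ih
        intro a ha
        simp only [List.mem_cons] at ha ih
        rcases ha with h1 | h2
        · have := ih r (Or.inl rfl); omega
        · exact ih a (Or.inr h2)
    · intro a ha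
      simp only [List.mem_cons] at ha
      rcases ha with h1 | h2
      · omega
      · exact ih a h2

theorem runsSpec_sum (xs : List Int) : (runsSpec xs).sum = (xs.length : Int) := by
  match xs with
  | [] => simp [runsSpec]
  | [_] => simp [runsSpec]
  | x :: y :: t =>
    have ih := runsSpec_sum (y :: t)
    simp only [runsSpec]
    split_ifs
    · cases hr : runsSpec (y :: t) with
      | nil => exact absurd hr (runsSpec_ne_nil _ (by simp))
      | cons r rs =>
        rw [hr] at ih
        simp only [List.sum_cons] at ih ⊢
        simp only [List.length_cons] at ih ⊢
        push_cast at ih ⊢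
        omega
    · simp only [List.sum_cons, ih, List.length_cons]
      push_cast
      omega

theorem pvGetLastD_of_ne_nil (l : List Int) (h : l ≠ []) (a b : Int) :
    l.getLastD a = l.getLastD b := by
  cases l with
  | nil => exact absurd rfl h
  | cons x t =>
    rw [List.getLastD_eq_getLast?, List.getLastD_eq_getLast?,
        List.getLast?_eq_some_getLast (by simp)]
    rfl

-- merge lemma: runsSpec of a concatenation fuses the boundary runs exactly as Source B does
theorem runsSpec_append (u v : List Int) (hu : u ≠ []) (hv : v ≠ []) :
    runsSpec (u ++ v) =
      if v.headI < u.getLastD 0 then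
        (runsSpec u).dropLast ++ [(runsSpec u).getLastD 0 + (runsSpec v).headI]
          ++ (runsSpec v).tail
      else runsSpec u ++ runsSpec v := by
  match u with
  | [a] =>
    cases v with
    | nil => exact absurd rfl hv
    | cons b t =>
      cases hrv : runsSpec (b :: t) with
      | nil => exact absurd hrv (runsSpec_ne_nil _ (by simp))
      | cons rv rvs =>
        simp only [List.cons_append, List.nil_append, runsSpec, hrv]
        simp only [List.headI, List.getLastD_cons, List.getLastD_nil]
        split_ifs with hba
        · simp [add_comm]
        · simp
  | a :: b :: u' =>
    have ih := runsSpec_append (b :: u') v (by simp) hv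
    cases hru2 : runsSpec (b :: u') with
    | nil => exact absurd hru2 (runsSpec_ne_nil _ (by simp))
    | cons r rs =>
      cases hrv : runsSpec v with
      | nil => exact absurd hrv (runsSpec_ne_nil _ hv)
      | cons rv rvs =>
        have hgl : (a :: b :: u').getLastD 0 = (b :: u').getLastD 0 := by
          rw [List.getLastD_cons]
          exact pvGetLastD_of_ne_nil _ (by simp) a 0
        have hL : runsSpec (a :: b :: u' ++ v) =
            if b < a then
              match runsSpec ((b :: u') ++ v) with
              | [] => []
              | r :: rs => (r + 1) :: rs
            else 1 :: runsSpec ((b :: u') ++ v) := by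
          simp only [List.cons_append, runsSpec]
        have hU : runsSpec (a :: b :: u') = if b < a then (r + 1) :: rs else 1 :: r :: rs := by
          simp only [runsSpec, hru2]
        rw [hL, show (b :: u') ++ v = b :: u' ++ v from rfl] at *
        rw [ih, hru2, hrv, hU, hgl]
        by_cases hba : b < a <;> by_cases hcr : v.headI < (b :: u').getLastD 0
        · rw [if_pos hba, if_pos hcr, if_pos hba, if_pos hcr]
          cases rs with
          | nil =>
            show (r + rv + 1) :: rvs = (r + 1 + rv) :: rvs
            rw [show r + rv + 1 = r + 1 + rv by ring]
          | cons s ss =>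
            have h1 : (r :: s :: ss).getLastD 0 = (s :: ss).getLastD 0 := by
              rw [List.getLastD_cons]
              exact pvGetLastD_of_ne_nil _ (by simp) r 0
            have h2 : ((r + 1) :: s :: ss).getLastD 0 = (s :: ss).getLastD 0 := by
              rw [List.getLastD_cons]
              exact pvGetLastD_of_ne_nil _ (by simp) (r + 1) 0
            simp only [List.dropLast_cons₂, h1, h2, List.cons_append, List.headI]
        · rw [if_pos hba, if_neg hcr, if_pos hba, if_neg hcr]
          simp
        · rw [if_neg hba, if_pos hcr, if_neg hba, if_pos hcr]
          have h1 : (1 :: r :: rs).getLastD 0 = (r :: rs).getLastD 0 := by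
            rw [List.getLastD_cons]
            exact pvGetLastD_of_ne_nil _ (by simp) 1 0
          simp only [List.dropLast_cons₂, h1, List.cons_append, List.headI]
        · rw [if_neg hba, if_neg hcr, if_neg hba, if_neg hcr]
          simp

theorem pvRuns_eq_aux : ∀ (n : Nat) (xs : List Int), xs.length ≤ n → xs ≠ [] →
    pvRuns xs = runsSpec xs := by
  intro n
  induction n with
  | zero =>
    intro xs hl hne
    exact absurd (List.eq_nil_of_length_eq_zero (by omega)) hne
  | succ n ih =>
    intro xs hl hne
    by_cases h1 : xs.length = 1
    · obtain ⟨x, rfl⟩ := List.length_eq_one_iff.mp h1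
      simp [pvRuns, runsSpec]
    · have hlen0 : xs.length ≠ 0 := by simpa [List.length_eq_zero_iff] using hne
      have hlen2 : 2 ≤ xs.length := by omega
      have hmid1 : 1 ≤ xs.length / 2 := by omega
      have hmidlt : xs.length / 2 < xs.length := by omega
      have htake_ne : xs.take (xs.length / 2) ≠ [] := by
        intro hc
        rcases List.take_eq_nil_iff.mp hc with h | h
        · omega
        · exact hne h
      have hdrop_ne : xs.drop (xs.length / 2) ≠ [] := by
        intro hc
        have := congrArg List.length hc
        simp at this
        omega
      rw [pvRuns, if_neg h1, dif_neg hne]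
      rw [ih (xs.take (xs.length / 2)) (by simp only [List.length_take]; omega) htake_ne,
          ih (xs.drop (xs.length / 2)) (by simp only [List.length_drop]; omega) hdrop_ne]
      have hsplit := List.take_append_drop (xs.length / 2) xs
      have hmerge := runsSpec_append (xs.take (xs.length / 2)) (xs.drop (xs.length / 2))
        htake_ne hdrop_ne
      rw [hsplit] at hmerge
      rw [hmerge]
      -- align the index accesses with headI/getLastD
      have hhead : (xs.drop (xs.length / 2)).headI = xs[xs.length / 2] := by
        rw [List.drop_eq_getElem_cons hmidlt]
        rfl
      have hgl : (xs.take (xs.length / 2)).getLastD 0 = xs[xs.length / 2 - 1] := by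
        rw [List.getLastD_eq_getLast?, List.getLast?_eq_some_getLast htake_ne]
        show (xs.take (xs.length / 2)).getLast htake_ne = _
        rw [List.getLast_eq_getElem]
        have hlt : (xs.take (xs.length / 2)).length - 1 < xs.length / 2 := by
          simp; omega
        rw [List.getElem_take]
        congr 1
        simp
        omega
      have hg1 : PySem.List.pyGetD xs ((xs.length / 2 : Nat) : Int) 0 = xs[xs.length / 2] := by
        rw [PySem.List.pyGetD_natCast]
        exact List.getD_eq_getElem xs 0 hmidlt
      have hg2 : PySem.List.pyGetD xs (((xs.length / 2 : Nat) : Int) - 1) 0 =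
          xs[xs.length / 2 - 1] := by
        rw [show ((xs.length / 2 : Nat) : Int) - 1 = ((xs.length / 2 - 1 : Nat) : Int) by omega]
        rw [PySem.List.pyGetD_natCast]
        exact List.getD_eq_getElem xs 0 (by omega)
      rw [hg1, hg2, ← hhead, ← hgl]
      split_ifs with hc
      · -- the boundary runs fuse; rewrite left[-1] and right[0]
        have hlne : runsSpec (xs.take (xs.length / 2)) ≠ [] := runsSpec_ne_nil _ htake_ne
        have hrne : runsSpec (xs.drop (xs.length / 2)) ≠ [] := runsSpec_ne_nil _ hdrop_ne
        rw [PySem.List.pyGetD_neg_one _ 0 hlne]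
        have hgl2 : (runsSpec (xs.take (xs.length / 2))).getLast hlne =
            (runsSpec (xs.take (xs.length / 2))).getLastD 0 := by
          rw [List.getLastD_eq_getLast?, List.getLast?_eq_some_getLast hlne]
          rfl
        rw [hgl2]
        cases hrv : runsSpec (xs.drop (xs.length / 2)) with
        | nil => exact absurd hrv hrne
        | cons rv rvs => simp [PySem.List.pyGetD_zero_cons, List.headI]
      · rfl

theorem pvRuns_eq (xs : List Int) (h : xs ≠ []) : pvRuns xs = runsSpec xs :=
  pvRuns_eq_aux xs.length xs le_rfl h

-- A's loop body, with the inline min written as 'min'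
def pvStepA (st : Int × Int) (a b : Int) : Int × Int :=
  if b < a then (st.1, st.2 + 1) else (min st.1 st.2, 1)

-- A's fold over range(1, n) is a fold over adjacent pairs
theorem pv_fold_adjacent {S : Type} (xs : List Int) (f : S → Int → Int → S) :
    ∀ (k m : Nat) (init : S), xs.length ≤ m + k →
      (PySem.List.pyRange ((m : Int) + 1) (xs.length : Int) 1).foldl
          (fun st i => f st (PySem.List.pyGetD xs (i - 1) 0) (PySem.List.pyGetD xs i 0)) init
        = ((xs.drop m).zip (xs.drop (m + 1))).foldl (fun st p => f st p.1 p.2) init := by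
  intro k
  induction k with
  | zero =>
    intro m init hk
    have h1 : (xs.length : Int) ≤ (m : Int) + 1 := by omega
    rw [PySem.List.pyRange_one_eq_nil h1]
    have h2 : xs.drop (m + 1) = [] := List.drop_eq_nil_of_le (by omega)
    simp [h2]
  | succ k ih =>
    intro m init hk
    by_cases hm : xs.length ≤ m + 1
    · have h1 : (xs.length : Int) ≤ (m : Int) + 1 := by omega
      rw [PySem.List.pyRange_one_eq_nil h1]
      have h2 : xs.drop (m + 1) = [] := List.drop_eq_nil_of_le (by omega)
      simp [h2]
    · have hlt : m + 1 < xs.length := by omega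
      have hcons : PySem.List.pyRange ((m : Int) + 1) (xs.length : Int) 1 =
          ((m : Int) + 1) :: PySem.List.pyRange ((m : Int) + 1 + 1) (xs.length : Int) 1 :=
        PySem.List.pyRange_one_cons (by omega)
      rw [hcons]
      simp only [List.foldl_cons]
      have hg1 : PySem.List.pyGetD xs ((m : Int) + 1 - 1) 0 = xs[m] := by
        rw [show (m : Int) + 1 - 1 = ((m : Nat) : Int) by ring]
        rw [PySem.List.pyGetD_natCast]
        exact List.getD_eq_getElem xs 0 (by omega)
      have hg2 : PySem.List.pyGetD xs ((m : Int) + 1) 0 = xs[m + 1] := by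
        rw [show (m : Int) + 1 = ((m + 1 : Nat) : Int) by push_cast; ring]
        rw [PySem.List.pyGetD_natCast]
        exact List.getD_eq_getElem xs 0 (by omega)
      rw [hg1, hg2]
      have hd1 : xs.drop m = xs[m] :: xs.drop (m + 1) := List.drop_eq_getElem_cons (by omega)
      have hd2 : xs.drop (m + 1) = xs[m + 1] :: xs.drop (m + 2) := List.drop_eq_getElem_cons hlt
      rw [hd1, hd2]
      simp only [List.zip_cons_cons, List.foldl_cons]
      have := ih (m + 1) (f init xs[m] xs[m + 1]) (by omega)
      rw [show ((m : Int) + 1 + 1) = ((m + 1 : Nat) : Int) + 1 by push_cast; ring]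
      rw [this, ← hd2]

-- 'bump': the first (partial) run seen by A's loop already carries c elements
def pvBump : List Int → Int → List Int
  | [], _ => []
  | r :: rs, c => (r + c - 1) :: rs

theorem pvBump_one (r : List Int) : pvBump r 1 = r := by
  cases r with
  | nil => rfl
  | cons a t => simp [pvBump]

-- invariant of A's pair fold, in terms of runsSpec
theorem pvAFold (xs : List Int) (h : xs ≠ []) :
    ∀ (ml c : Int),
      ((xs.zip (xs.drop 1)).foldl (fun st p => pvStepA st p.1 p.2) (ml, c)) =
        ((pvBump (runsSpec xs) c).dropLast.foldl min ml,
         (pvBump (runsSpec xs) c).getLastD 0) := by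
  match xs with
  | [x] =>
    intro ml c
    simp [runsSpec, pvBump]
  | x :: y :: t =>
    have ih := pvAFold (y :: t) (by simp)
    intro ml c
    have hzip : (x :: y :: t).zip ((x :: y :: t).drop 1) =
        (x, y) :: ((y :: t).zip ((y :: t).drop 1)) := by simp
    rw [hzip]
    simp only [List.foldl_cons]
    by_cases hlt : y < x
    · have hstep : pvStepA (ml, c) x y = (ml, c + 1) := by simp [pvStepA, hlt]
      rw [hstep, ih ml (c + 1)]
      cases hr : runsSpec (y :: t) with
      | nil => exact absurd hr (runsSpec_ne_nil _ (by simp))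
      | cons r rs =>
        have hxs : runsSpec (x :: y :: t) = (r + 1) :: rs := by
          simp only [runsSpec, if_pos hlt, hr]
        rw [hxs]
        simp only [pvBump]
        rw [show r + 1 + c - 1 = r + (c + 1) - 1 by ring]
    · have hstep : pvStepA (ml, c) x y = (min ml c, 1) := by simp [pvStepA, hlt]
      rw [hstep, ih (min ml c) 1, pvBump_one]
      have hxs : runsSpec (x :: y :: t) = 1 :: runsSpec (y :: t) := by
        simp only [runsSpec, if_neg hlt]
      rw [hxs]
      cases hr : runsSpec (y :: t) with
      | nil => exact absurd hr (runsSpec_ne_nil _ (by simp))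
      | cons r rs =>
        simp only [pvBump]
        rw [show 1 + c - 1 = c by ring]
        simp only [List.dropLast_cons₂, List.foldl_cons, List.getLastD_cons]

theorem pvFoldMin_assoc (l : List Int) : ∀ (a b : Int),
    l.foldl min (min a b) = min a (l.foldl min b) := by
  induction l with
  | nil => intro a b; rfl
  | cons x t ih =>
    intro a b
    simp only [List.foldl_cons]
    rw [min_assoc, ih]

theorem pvFoldMin_le (l : List Int) (a : Int) : l.foldl min a ≤ a := by
  have := pvFoldMin_assoc l a a
  rw [min_self] at this
  rw [this]
  exact min_le_left _ _

theorem pvFoldMin_split (l : List Int) (h : l ≠ []) (ml : Int) :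
    min (l.dropLast.foldl min ml) (l.getLastD 0) = l.foldl min ml := by
  conv_rhs => rw [← List.dropLast_append_getLast h]
  rw [List.foldl_append]
  simp only [List.foldl_cons, List.foldl_nil]
  congr 1
  rw [List.getLastD_eq_getLast?, List.getLast?_eq_some_getLast h]
  rfl

theorem pvIteMin (a b : Int) : (if b < a then b else a) = min a b := by
  rw [min_def]; split_ifs <;> omega

-- ===== VERDICT (by name: the statement is the Claim_ definition above) =====
theorem min_decreasing_length_spec : Claim_equal_min_decreasing_length := by
  intro arr _
  unfold Spec_min_decreasing_length
  by_cases h0 : arr = []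
  · subst h0
    simp [min_decreasing_length, min_decreasing_length_alt,
      PySem.List.pyRange_one_eq_nil (by norm_num : (0 : Int) ≤ 1)]
  · cases hr : runsSpec arr with
    | nil => exact absurd hr (runsSpec_ne_nil arr h0)
    | cons r rs =>
      have hB : min_decreasing_length_alt arr = rs.foldl min r := by
        unfold min_decreasing_length_alt
        rw [if_neg h0, pvRuns_eq arr h0, hr, PySem.List.min?_id_cons]
      -- bounds on the run lengths
      have hsum := runsSpec_sum arr
      rw [hr] at hsum
      simp only [List.sum_cons] at hsum
      have hrs_nonneg : 0 ≤ rs.sum := by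
        apply List.sum_nonneg
        intro a ha
        have := runsSpec_pos arr a (by rw [hr]; exact List.mem_cons_of_mem r ha)
        omega
      have hrn : r ≤ (arr.length : Int) := by omega
      have hMB : rs.foldl min r ≤ (arr.length : Int) :=
        le_trans (pvFoldMin_le rs r) hrn
      -- A's loop body as pvStepA over the adjacent-pair list
      have hfun : (fun (st : Int × Int) (i : Int) =>
          if PySem.List.pyGetD arr i 0 < PySem.List.pyGetD arr (i - 1) 0 then (st.1, st.2 + 1)
          else ((if st.2 < st.1 then st.2 else st.1), 1))
        = (fun (st : Int × Int) (i : Int) =>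
            pvStepA st (PySem.List.pyGetD arr (i - 1) 0) (PySem.List.pyGetD arr i 0)) := by
        funext st i
        by_cases hc : PySem.List.pyGetD arr i 0 < PySem.List.pyGetD arr (i - 1) 0
        · simp [pvStepA, hc]
        · simp only [pvStepA, if_neg hc, min_def]
          split_ifs <;> (first | rfl | (exfalso; omega))
      have hadj := pv_fold_adjacent arr pvStepA arr.length 0 (((arr.length : Int) + 1, 1)) (by omega)
      simp only [Nat.cast_zero, zero_add, List.drop_zero] at hadj
      have hA := pvAFold arr h0 ((arr.length : Int) + 1) 1
      rw [pvBump_one, hr] at hA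
      unfold min_decreasing_length
      simp only []
      rw [hfun, hadj, hA, pvIteMin]
      rw [pvFoldMin_split (r :: rs) (by simp) ((arr.length : Int) + 1)]
      simp only [List.foldl_cons]
      rw [pvFoldMin_assoc rs ((arr.length : Int) + 1) r]
      rw [min_eq_right (by omega : rs.foldl min r ≤ (arr.length : Int) + 1)]
      rw [if_pos hMB, hB]
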